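-- pv_equiv track=rewrite | github.com/mnur53/code_jam | 2021/Qualification/1_reversort/reversort.py | reversesort_with_cost
-- ===== SOURCE A (Python) =====
-- def reversesort_with_cost(arr):
--
--     cost = 0
--
--     for i in range(len(arr)-1):
--
--         this_min = arr[i]
--         this_min_index = i
--
--         for j in range(i+1, len(arr)):
--             if arr[j] < this_min:
--                 this_min = arr[j]
--                 this_min_index = j
--
--         # reverse
--         reverse_part = arr[i:this_min_index+1]
--         arr = arr[:i] + reverse_part[::-1] + arr[this_min_index+1:]
--
--         cost = cost + (this_min_index - i + 1)
--
--     return str(cost)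
-- ===== SOURCE B (Python) =====
-- def reversesort_with_cost(arr):
--     rest = list(arr)
--     total = 0
--     while len(rest) > 1:
--         j = rest.index(min(rest))
--         total += j + 1
--         rest = rest[:j][::-1] + rest[j+1:]
--     return str(total)
-- ===== Notes on version B (the rewrite author's own statement) =====
-- stated objective: simpler
-- what changed: Replaces the nested index loops over a full array with a growing sorted prefix by a short while-loop on a shrinking suffix list that uses min/index builtins and drops the placed minimum each round.
import Mathlib
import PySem

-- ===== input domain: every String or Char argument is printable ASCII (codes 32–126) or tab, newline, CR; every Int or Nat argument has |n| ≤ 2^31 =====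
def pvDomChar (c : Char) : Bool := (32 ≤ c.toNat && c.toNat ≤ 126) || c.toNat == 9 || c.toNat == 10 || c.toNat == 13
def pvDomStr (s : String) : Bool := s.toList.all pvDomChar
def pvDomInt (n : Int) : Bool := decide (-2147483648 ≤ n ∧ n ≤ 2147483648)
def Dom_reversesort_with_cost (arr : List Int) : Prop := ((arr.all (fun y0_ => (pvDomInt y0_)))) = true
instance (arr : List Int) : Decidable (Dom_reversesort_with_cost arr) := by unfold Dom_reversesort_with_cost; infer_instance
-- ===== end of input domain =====

-- B computes the Reversort cost by recursion on a shrinking suffix (min/index, drop the placed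
-- minimum) instead of A's nested index loops over the whole array; same cost, simpler decomposition.


-- ===== PORT A =====
-- literal transliteration of A: outer loop over range(len(arr)-1) with state (arr, cost),
-- inner loop over range(i+1, len(arr)) tracking (this_min, this_min_index);
-- arr[i]/arr[j] are always in range here, ported as pyGetD; reverse_part[::-1] is List.reverse
-- (PySem.List.slice?_none_none_neg_one).
def reversesort_with_cost (arr : List Int) : String :=
  let st :=
    (PySem.List.pyRange 0 ((arr.length : Int) - 1) 1).foldl
      (fun (st : List Int × Int) i =>
        let a := st.1
        let cost := st.2
        let this_min := PySem.List.pyGetD a i 0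
        let p :=
          (PySem.List.pyRange (i + 1) (a.length : Int) 1).foldl
            (fun (p : Int × Int) j =>
              if PySem.List.pyGetD a j 0 < p.1 then (PySem.List.pyGetD a j 0, j) else p)
            (this_min, i)
        let reverse_part := PySem.List.slice a (some i) (some (p.2 + 1))
        let a' := PySem.List.slice a none (some i) ++ reverse_part.reverse ++
                  PySem.List.slice a (some (p.2 + 1)) none
        (a', cost + (p.2 - i + 1)))
      (arr, 0)
  PySem.Int.toStr st.2

-- ===== PORT B =====
-- Source B's while-loop as recursion on the shrinking list `rest`; rest[:j][::-1] is
-- (…take…).reverse (PySem.List.slice?_none_none_neg_one).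
def altGo (rest : List Int) (total : Int) : Int :=
  if 1 < rest.length then
    match hm : PySem.List.min? rest (fun x => x) with
    | none => total  -- unreachable: rest ≠ []
    | some m =>
      match hj : PySem.List.index? rest m with
      | none => total  -- unreachable: m ∈ rest
      | some j =>
        altGo ((PySem.List.slice rest none (some (j : Int))).reverse ++
               PySem.List.slice rest (some ((j : Int) + 1)) none)
              (total + ((j : Int) + 1))
  else total
termination_by rest.length
decreasing_by
  have hmem : m ∈ rest := PySem.List.min?_mem hm
  have hj' : rest.idxOf? m = some j := by
    rwa [PySem.List.index?_eq_idxOf?] at hj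
  obtain ⟨hjlt, -, -⟩ := List.idxOf?_eq_some_iff.mp hj'
  have h1 : PySem.List.slice rest none (some (j : Int)) = rest.take j :=
    PySem.List.slice_to_natCast rest j
  have h2 : PySem.List.slice rest (some ((j : Int) + 1)) none = rest.drop (j + 1) := by
    have := PySem.List.slice_from_natCast rest (j + 1)
    push_cast at this
    exact this
  simp [h1, h2]
  omega

def reversesort_with_cost_alt (arr : List Int) : String :=
  PySem.Int.toStr (altGo arr 0)

-- ===== PRECONDITION & SPEC =====
def Spec_reversesort_with_cost (arr : List Int) (out : String) : Prop := out = reversesort_with_cost_alt arr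
instance (arr : List Int) (out : String) : Decidable (Spec_reversesort_with_cost arr out) := by unfold Spec_reversesort_with_cost; infer_instance

-- ===== CLAIM (what is proved, stated in full; the proofs are below) =====
def Claim_equal_reversesort_with_cost : Prop := ∀ (arr : List Int), Dom_reversesort_with_cost arr → Spec_reversesort_with_cost arr (reversesort_with_cost arr)

-- ===== LEMMAS AND PROOFS =====
def selScan : List Int → Int → Int → Int → Int × Int
  | [], m, mi, _ => (m, mi)
  | v :: t, m, mi, j => if v < m then selScan t v j (j+1) else selScan t m mi (j+1)

def bodyA (st : List Int × Int) (i : Int) : List Int × Int :=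
  let a := st.1
  let cost := st.2
  let this_min := PySem.List.pyGetD a i 0
  let p :=
    (PySem.List.pyRange (i + 1) (a.length : Int) 1).foldl
      (fun (p : Int × Int) j =>
        if PySem.List.pyGetD a j 0 < p.1 then (PySem.List.pyGetD a j 0, j) else p)
      (this_min, i)
  (PySem.List.slice a none (some i) ++ (PySem.List.slice a (some i) (some (p.2 + 1))).reverse ++
     PySem.List.slice a (some (p.2 + 1)) none, cost + (p.2 - i + 1))

lemma portA_eq (arr : List Int) :
    reversesort_with_cost arr =
      PySem.Int.toStr (((PySem.List.pyRange 0 ((arr.length : Int) - 1) 1).foldl bodyA (arr, 0)).2) := rfl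

lemma foldl_min_le (t : List Int) (x : Int) : t.foldl min x ≤ x := by
  induction t generalizing x with
  | nil => simp
  | cons v t ih => simpa using le_trans (ih (min x v)) (min_le_left _ _)

lemma idxOf?_eq_some_idxOf (r : List Int) (M : Int) (h : M ∈ r) : r.idxOf? M = some (r.idxOf M) := by
  induction r with
  | nil => simp at h
  | cons v t ih =>
    by_cases hv : v = M
    · subst hv; simp [List.idxOf?_cons]
    · have hm : M ∈ t := by simpa [hv, Ne.symm hv] using h
      simp [List.idxOf?_cons, hv, ih hm, beq_iff_eq]

lemma selScan_spec (t : List Int) : ∀ (x mi j : Int),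
    selScan t x mi j = (t.foldl min x,
      if t.foldl min x = x then mi else j + (t.idxOf (t.foldl min x) : Int)) := by
  induction t with
  | nil => intro x mi j; simp [selScan]
  | cons v t ih =>
    intro x mi j
    by_cases hvx : v < x
    · have hmin : min x v = v := min_eq_right (le_of_lt hvx)
      have hle : t.foldl min v ≤ v := foldl_min_le t v
      simp only [selScan, if_pos hvx, List.foldl_cons, hmin, ih]
      have hMx : t.foldl min v ≠ x := by omega
      rw [if_neg hMx, List.idxOf_cons]
      by_cases hMv : t.foldl min v = v
      · have hb : (v == t.foldl min v) = true := by simp [hMv]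
        rw [if_pos hMv, hb]
        simp
      · have hb : (v == t.foldl min v) = false := by
          simp only [beq_eq_false_iff_ne, ne_eq]
          exact fun h => hMv h.symm
        rw [if_neg hMv, hb]
        simp only [cond_false]
        congr 1
        push_cast
        ring
    · have hmin : min x v = x := min_eq_left (by omega)
      have hle : t.foldl min x ≤ x := foldl_min_le t x
      simp only [selScan, if_neg hvx, List.foldl_cons, hmin, ih]
      by_cases hMx : t.foldl min x = x
      · simp [hMx]
      · have hMv : t.foldl min x ≠ v := by omega
        have hb : (v == t.foldl min x) = false := by
          simp only [beq_eq_false_iff_ne, ne_eq]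
          exact fun h => hMv h.symm
        rw [if_neg hMx, if_neg hMx, List.idxOf_cons, hb]
        simp only [cond_false]
        congr 1
        push_cast
        ring

lemma inner_eq (t : List Int) : ∀ (a : List Int) (lo : Int) (acc : Int × Int), 0 ≤ lo →
    a.drop lo.toNat = t →
    (PySem.List.pyRange lo (a.length : Int) 1).foldl
        (fun (p : Int × Int) j =>
          if PySem.List.pyGetD a j 0 < p.1 then (PySem.List.pyGetD a j 0, j) else p) acc
      = selScan t acc.1 acc.2 lo := by
  induction t with
  | nil =>
    intro a lo acc hlo h
    have hlen : a.length ≤ lo.toNat := List.drop_eq_nil_iff.mp h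
    have : (a.length : Int) ≤ lo := by omega
    rw [PySem.List.pyRange_one_eq_nil this]
    simp [selScan]
  | cons v t ih =>
    intro a lo acc hlo h
    have hlen : lo.toNat < a.length := by
      have := congrArg List.length h
      simp at this
      omega
    have hloInt : lo < (a.length : Int) := by omega
    have hget : PySem.List.pyGetD a lo 0 = v := by
      rw [PySem.List.pyGetD_eq_getElem a 0 hlo hloInt]
      have h0 : a[lo.toNat]? = some v := by
        have := congrArg (fun l => l[0]?) h
        simpa [List.getElem?_drop] using this
      simpa [List.getElem?_eq_getElem hlen] using h0
    have hdrop : a.drop (lo + 1).toNat = t := by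
      have h1 : (lo + 1).toNat = lo.toNat + 1 := by omega
      have h2 := congrArg (List.drop 1) h
      simpa [List.drop_drop, h1] using h2
    rw [PySem.List.pyRange_one_cons hloInt, List.foldl_cons]
    simp only [hget]
    by_cases hv : v < acc.1
    · rw [if_pos hv]
      rw [ih a (lo + 1) (v, lo) (by omega) hdrop]
      simp [selScan, hv]
    · rw [if_neg hv]
      rw [ih a (lo + 1) acc (by omega) hdrop]
      simp [selScan, hv]

lemma bodyA_step (p t : List Int) (x c : Int) :
    bodyA (p ++ x :: t, c) (p.length : Int) =
      ((p ++ [t.foldl min x]) ++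
         (((x :: t).take ((x :: t).idxOf (t.foldl min x))).reverse ++
           (x :: t).drop ((x :: t).idxOf (t.foldl min x) + 1)),
       c + (((x :: t).idxOf (t.foldl min x) : Int) + 1)) := by
  have hM : t.foldl min x ∈ x :: t := PySem.List.min?_mem (PySem.List.min?_id_cons x t)
  set M := t.foldl min x with hMdef
  set K := (x :: t).idxOf M with hKdef
  have hK : K < (x :: t).length := List.idxOf_lt_length_of_mem hM
  have hgetK : (x :: t)[K] = M := List.getElem_idxOf hK
  unfold bodyA
  simp only []
  -- this_min = x
  have hthis : PySem.List.pyGetD (p ++ x :: t) (p.length : Int) 0 = x := by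
    rw [PySem.List.pyGetD_eq_getElem _ 0 (by positivity) (by simp)]
    simp
  -- the inner fold
  have hdrop : (p ++ x :: t).drop ((p.length : Int) + 1).toNat = t := by
    have h1 : ((p.length : Int) + 1).toNat = p.length + 1 := by omega
    rw [h1]
    simp
  have hinner := inner_eq t (p ++ x :: t) ((p.length : Int) + 1)
      (x, (p.length : Int)) (by positivity) hdrop
  rw [hthis, hinner, selScan_spec]
  -- the selected index
  have hsnd : (if M = x then (p.length : Int)
      else (p.length : Int) + 1 + (t.idxOf M : Int)) = (p.length : Int) + (K : Int) := by
    by_cases hMx : M = x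
    · rw [if_pos hMx, hKdef, hMx, List.idxOf_cons]
      simp
    · have hb : (x == M) = false := by
        simp only [beq_eq_false_iff_ne, ne_eq]
        exact fun h => hMx h.symm
      rw [if_neg hMx, hKdef, List.idxOf_cons, hb]
      simp only [cond_false]
      push_cast
      ring
  rw [hsnd]
  -- slices
  have hsl1 : PySem.List.slice (p ++ x :: t) none (some (p.length : Int)) = p := by
    rw [PySem.List.slice_to_natCast]
    simp
  have hc1 : (p.length : Int) + (K : Int) + 1 = ((p.length : Nat) : Int) + ((K + 1 : Nat) : Int) := by
    push_cast; ring
  have hsl2 : PySem.List.slice (p ++ x :: t) (some (p.length : Int)) (some ((p.length : Int) + (K : Int) + 1)) =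
      (x :: t).take (K + 1) := by
    rw [hc1, PySem.List.slice_natCast_add]
    simp
  have hc2 : (p.length : Int) + (K : Int) + 1 = ((p.length + (K + 1) : Nat) : Int) := by
    push_cast; ring
  have hsl3 : PySem.List.slice (p ++ x :: t) (some ((p.length : Int) + (K : Int) + 1)) none =
      (x :: t).drop (K + 1) := by
    rw [hc2, PySem.List.slice_from_natCast]
    simp [List.drop_append]
  have htake : ((x :: t).take (K + 1)).reverse = M :: ((x :: t).take K).reverse := by
    rw [List.take_succ_eq_append_getElem hK, hgetK]
    simp
  rw [hsl1, hsl2, hsl3, htake]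
  refine Prod.ext ?_ ?_
  · simp
  · show c + (↑p.length + ↑K - ↑p.length + 1) = c + (↑K + 1)
    ring

lemma altGo_base (r : List Int) (c : Int) (h : ¬ 1 < r.length) : altGo r c = c := by
  rw [altGo.eq_def]
  simp [h]

lemma altGo_cons (x : Int) (t : List Int) (c : Int) (h : t ≠ []) :
    altGo (x :: t) c =
      altGo (((x :: t).take ((x :: t).idxOf (t.foldl min x))).reverse ++
             (x :: t).drop ((x :: t).idxOf (t.foldl min x) + 1))
            (c + (((x :: t).idxOf (t.foldl min x) : Int) + 1)) := by
  have hM : t.foldl min x ∈ x :: t := PySem.List.min?_mem (PySem.List.min?_id_cons x t)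
  have hlen : 1 < (x :: t).length := by
    cases t with
    | nil => simp at h
    | cons a s => simp
  rw [altGo.eq_def]
  rw [if_pos hlen]
  rw [PySem.List.min?_id_cons]
  have hidx : PySem.List.index? (x :: t) (t.foldl min x) = some ((x :: t).idxOf (t.foldl min x)) := by
    rw [PySem.List.index?_eq_idxOf?]
    exact idxOf?_eq_some_idxOf _ _ hM
  split
  case h_1 heq => exact absurd heq (by simp)
  case h_2 m heq =>
  rw [Option.some_inj] at heq
  subst heq
  split
  case h_1 heq2 => rw [hidx] at heq2; cases heq2
  case h_2 j heq2 =>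
  rw [hidx, Option.some_inj] at heq2
  subst heq2
  have h1 : PySem.List.slice (x :: t) none (some (((x :: t).idxOf (t.foldl min x) : Nat) : Int)) =
      (x :: t).take ((x :: t).idxOf (t.foldl min x)) := PySem.List.slice_to_natCast _ _
  have hc : (((x :: t).idxOf (t.foldl min x) : Nat) : Int) + 1 =
      ((((x :: t).idxOf (t.foldl min x) + 1 : Nat)) : Int) := by push_cast; ring
  have h2 : PySem.List.slice (x :: t) (some ((((x :: t).idxOf (t.foldl min x) : Nat)) + 1 : Int)) none =
      (x :: t).drop ((x :: t).idxOf (t.foldl min x) + 1) := by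
    rw [hc, PySem.List.slice_from_natCast]
  rw [h1, h2]

lemma outer_eq (n : Nat) : ∀ (r p : List Int) (c : Int), r.length = n →
    ((PySem.List.pyRange (p.length : Int) ((p.length : Int) + (r.length : Int) - 1) 1).foldl
        bodyA (p ++ r, c)).2 = altGo r c := by
  induction n using Nat.strong_induction_on with
  | _ n ih =>
    intro r p c hn
    by_cases hsmall : r.length ≤ 1
    · have hb : (p.length : Int) + (r.length : Int) - 1 ≤ (p.length : Int) := by
        omega
      rw [PySem.List.pyRange_one_eq_nil hb, List.foldl_nil, altGo_base r c (by omega)]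
    · obtain ⟨x, t, rfl⟩ : ∃ x t, r = x :: t := by
        cases r with
        | nil => simp at hsmall
        | cons a s => exact ⟨a, s, rfl⟩
      have ht : t ≠ [] := by
        cases t with
        | nil => simp at hsmall
        | cons a s => simp
      have hM : t.foldl min x ∈ x :: t := PySem.List.min?_mem (PySem.List.min?_id_cons x t)
      have hK : (x :: t).idxOf (t.foldl min x) < (x :: t).length :=
        List.idxOf_lt_length_of_mem hM
      set K := (x :: t).idxOf (t.foldl min x) with hKdef
      have hlt : (p.length : Int) < (p.length : Int) + ((x :: t).length : Int) - 1 := by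
        simp only [List.length_cons] at hsmall ⊢
        omega
      rw [PySem.List.pyRange_one_cons hlt, List.foldl_cons, bodyA_step]
      set M := t.foldl min x with hMdef
      set rest := ((x :: t).take K).reverse ++ (x :: t).drop (K + 1) with hrest
      have hrlen : rest.length = (x :: t).length - 1 := by
        rw [hrest]
        simp only [List.length_append, List.length_reverse, List.length_take, List.length_drop]
        simp only [List.length_cons] at hK ⊢
        omega
      have hplen : ((p ++ [M]).length : Int) = (p.length : Int) + 1 := by simp
      have hbound : (p.length : Int) + ((x :: t).length : Int) - 1 =
          (p.length : Int) + 1 + (rest.length : Int) - 1 := by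
        rw [hrlen]; omega
      rw [altGo_cons x t c ht, ← hKdef, ← hrest]
      rw [hbound, show ((p.length : Int) + 1) = ((p ++ [M]).length : Int) from hplen.symm]
      exact ih rest.length (by simp only [List.length_cons] at *; omega) rest (p ++ [M])
        (c + ((K : Int) + 1)) rfl


-- ===== VERDICT (by name: the statement is the Claim_ definition above) =====
theorem reversesort_with_cost_spec : Claim_equal_reversesort_with_cost := by
  intro arr _
  unfold Spec_reversesort_with_cost
  rw [portA_eq]
  unfold reversesort_with_cost_alt
  cases arr with
  | nil =>
    rw [altGo_base [] 0 (by simp)]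
    rw [PySem.List.pyRange_one_eq_nil (by simp)]
    rfl
  | cons x t =>
    have h := outer_eq (x :: t).length (x :: t) [] 0 rfl
    simp only [List.length_nil, Nat.cast_zero, List.nil_append, zero_add] at h
    rw [h]
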